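-- pv_equiv track=rewrite | github.com/d0jyaaan/Projects-2022 | Chapter 2/exercise7.py | count
-- ===== SOURCE A (Python) =====
-- def count(seq):
--     # insert code to return the number of occurrences of 11111 in the sequence
--     count = 0
--     # iterate through all elements
--     for i in range(0, len(seq), 1):
--         check = 0
--
--         # check for 11111
--         for j in seq[i: i+5]:
--             if j == 1:
--                 check += 1
--         if check == 5:
--             count += 1
--
--     return count
-- ===== SOURCE B (Python) =====
-- def count(seq):
--     run = 0
--     res = 0
--     for x in seq:
--         if x == 1:
--             run += 1
--         else:
--             run = 0
--         if run >= 5: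
--             res += 1
--     return res
-- ===== Notes on version B (the rewrite author's own statement) =====
-- stated objective: simpler
-- what changed: Replaces the nested sliding-window recount (a fresh count over seq[i:i+5] for every start index) by a single pass maintaining the current run length of consecutive 1s, incrementing the result whenever the run reaches 5.
import Mathlib
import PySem

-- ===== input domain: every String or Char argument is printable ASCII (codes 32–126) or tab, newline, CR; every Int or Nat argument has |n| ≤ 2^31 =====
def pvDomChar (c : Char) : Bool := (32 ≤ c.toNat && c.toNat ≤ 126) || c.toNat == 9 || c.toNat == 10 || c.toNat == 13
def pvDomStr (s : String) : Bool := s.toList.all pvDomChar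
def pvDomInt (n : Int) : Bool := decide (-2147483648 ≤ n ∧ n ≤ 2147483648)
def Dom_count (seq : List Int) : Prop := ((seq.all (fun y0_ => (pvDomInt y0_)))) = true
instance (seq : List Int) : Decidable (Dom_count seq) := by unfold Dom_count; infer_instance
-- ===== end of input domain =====

-- B changes the algorithm: one pass keeping the current run of consecutive 1s instead of recounting every 5-element window; same value, simpler.

-- ===== PORT A =====
-- A's inner loop: "check = 0; for j in seq[i:i+5]: if j == 1: check += 1"
def onesIn (l : List Int) : Int := l.foldl (fun check j => if j == 1 then check + 1 else check) 0

def count (seq : List Int) : Int :=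
  (PySem.List.pyRange 0 (seq.length : Int) 1).foldl
    (fun cnt i =>
      if onesIn (PySem.List.slice seq (some i) (some (i + 5))) == 5 then cnt + 1 else cnt) 0

-- ===== PORT B =====
def count_alt (seq : List Int) : Int :=
  (seq.foldl
    (fun (st : Int × Int) x =>
      let run := if x == 1 then st.1 + 1 else 0
      (run, if run ≥ 5 then st.2 + 1 else st.2)) (0, 0)).2

-- ===== PRECONDITION & SPEC =====
def Spec_count (seq : List Int) (out : Int) : Prop := out = count_alt seq
instance (seq : List Int) (out : Int) : Decidable (Spec_count seq out) := by unfold Spec_count; infer_instance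

-- ===== CLAIM (what is proved, stated in full; the proofs are below) =====
def Claim_equal_count : Prop := ∀ (seq : List Int), Dom_count seq → Spec_count seq (count seq)

-- ===== LEMMAS AND PROOFS =====

-- structural recursion counting A's all-ones 5-windows by start position
def aRec : List Int → Int
  | [] => 0
  | x :: xs => aRec xs + (if onesIn ((x :: xs).take 5) == 5 then 1 else 0)

-- one-pass recursion of B, current run carried as a Nat
def gRec : Nat → List Int → Int
  | _, [] => 0
  | k, x :: xs =>
    if x == 1 then (if (k : Int) + 1 ≥ 5 then 1 else 0) + gRec (k + 1) xs
    else gRec 0 xs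

theorem onesIn_acc (l : List Int) (c : Int) :
    l.foldl (fun check j => if j == 1 then check + 1 else check) c = c + onesIn l := by
  induction l generalizing c with
  | nil => simp [onesIn]
  | cons x xs ih =>
    rw [List.foldl_cons, ih]
    conv_rhs => rw [onesIn, List.foldl_cons, ih]
    split <;> ring

theorem onesIn_cons (x : Int) (l : List Int) :
    onesIn (x :: l) = (if x == 1 then 1 else 0) + onesIn l := by
  show List.foldl _ _ _ = _
  rw [List.foldl_cons, onesIn_acc]
  split <;> ring

theorem onesIn_nonneg (l : List Int) : 0 ≤ onesIn l := by
  induction l with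
  | nil => simp [onesIn]
  | cons x xs ih => rw [onesIn_cons]; split <;> omega

theorem onesIn_le_length (l : List Int) : onesIn l ≤ l.length := by
  induction l with
  | nil => simp [onesIn]
  | cons x xs ih => rw [onesIn_cons]; simp only [List.length_cons]; split <;> push_cast <;> omega

theorem onesIn_replicate (k : Nat) : onesIn (List.replicate k 1) = k := by
  induction k with
  | zero => simp [onesIn]
  | succ n ih =>
    rw [List.replicate_succ, onesIn_cons, ih]
    simp
    omega

theorem onesIn_append (a b : List Int) : onesIn (a ++ b) = onesIn a + onesIn b := by
  induction a with
  | nil => simp [onesIn]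
  | cons x xs ih => rw [List.cons_append, onesIn_cons, onesIn_cons, ih]; ring

theorem rangeFold_aRec (seq : List Int) (c : Int) :
    (List.range seq.length).foldl
      (fun cnt k => if onesIn ((seq.drop k).take 5) == 5 then cnt + 1 else cnt) c = c + aRec seq := by
  induction seq generalizing c with
  | nil => simp [aRec]
  | cons x xs ih =>
    rw [List.length_cons, List.range_succ_eq_map, List.foldl_cons, List.foldl_map]
    simp only [List.drop_succ_cons, List.drop_zero]
    refine (ih _).trans ?_
    show (if onesIn ((x :: xs).take 5) == 5 then c + 1 else c) + aRec xs
        = c + (aRec xs + (if onesIn ((x :: xs).take 5) == 5 then 1 else 0))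
    split <;> ring

-- A's port equals aRec
theorem count_eq_aRec (seq : List Int) : count seq = aRec seq := by
  have hs : ∀ (k : Nat), PySem.List.slice seq (some (k : Int)) (some ((k : Int) + 5)) = (seq.drop k).take 5 := by
    intro k
    have := PySem.List.slice_natCast_add seq k 5
    simpa using this
  unfold count
  rw [PySem.List.pyRange_one]
  have h : (((seq.length : Int)) - 0).toNat = seq.length := by omega
  rw [h, List.foldl_map]
  simp only [zero_add, hs]
  rw [rangeFold_aRec seq 0, zero_add]

-- B's fold in terms of gRec
theorem foldB (xs : List Int) (k : Nat) (res : Int) :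
    (xs.foldl (fun (st : Int × Int) x =>
        let run := if x == 1 then st.1 + 1 else 0
        (run, if run ≥ 5 then st.2 + 1 else st.2)) ((k : Int), res)).2
      = res + gRec k xs := by
  induction xs generalizing k res with
  | nil => simp [gRec]
  | cons x xs ih =>
    by_cases hx : x = 1
    · subst hx
      show (List.foldl _ ((k : Int) + 1, if ((k : Int) + 1) ≥ 5 then res + 1 else res) xs).2
          = res + ((if ((k : Int) + 1) ≥ 5 then 1 else 0) + gRec (k + 1) xs)
      have hcast : ((k : Int) + 1) = ((k + 1 : Nat) : Int) := by push_cast; ring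
      rw [hcast, ih]
      split <;> ring
    · have hb : (x == 1) = false := by simp [hx]
      show (List.foldl _ ((if x == 1 then (k : Int) + 1 else 0),
              if (if x == 1 then (k : Int) + 1 else 0) ≥ 5 then res + 1 else res) xs).2
          = res + gRec k (x :: xs)
      rw [hb]
      show (List.foldl _ (((0 : Nat) : Int), if (0 : Int) ≥ 5 then res + 1 else res) xs).2
          = res + gRec k (x :: xs)
      rw [if_neg (by norm_num), ih]
      simp [gRec, hb]

theorem aRec_replicate (k : Nat) : aRec (List.replicate k 1) = max ((k : Int) - 4) 0 := by
  induction k with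
  | zero => simp [aRec]
  | succ n ih =>
    rw [List.replicate_succ]
    show aRec (List.replicate n 1) + _ = _
    rw [ih, ← List.replicate_succ, List.take_replicate, onesIn_replicate]
    by_cases h : n ≥ 4
    · have h1 : min 5 (n + 1) = 5 := by omega
      rw [h1]
      have h5 : ((((5 : Nat) : Int)) == 5) = true := by norm_num
      rw [if_pos h5]
      push_cast
      omega
    · have h1 : min 5 (n + 1) = n + 1 := by omega
      rw [h1]
      have h2 : ¬ ((((n + 1 : Nat) : Int)) == 5) = true := by
        simp only [beq_iff_eq]
        push_cast
        omega
      rw [if_neg h2]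
      push_cast
      omega

theorem aRec_replicate_append_ne (k : Nat) (x : Int) (xs : List Int) (hx : ¬ x = 1) :
    aRec (List.replicate k 1 ++ x :: xs) = aRec xs + max ((k : Int) - 4) 0 := by
  induction k with
  | zero =>
    simp only [List.replicate_zero, List.nil_append]
    show aRec xs + _ = _
    have h5 : onesIn ((x :: xs).take 5) ≠ 5 := by
      rw [List.take_cons (by omega), onesIn_cons]
      have h1 : onesIn (xs.take 4) ≤ (xs.take 4).length := onesIn_le_length _
      have h2 : (xs.take 4).length ≤ 4 := by simp [List.length_take]
      push_cast at *
      simp only [beq_iff_eq, hx, if_false]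
      omega
    simp only [beq_iff_eq, h5, if_false]
    norm_num
  | succ n ih =>
    rw [List.replicate_succ, List.cons_append]
    show aRec (List.replicate n 1 ++ x :: xs) + _ = _
    rw [← List.cons_append, ← List.replicate_succ, ih]
    rw [List.take_append, List.take_replicate, onesIn_append, onesIn_replicate]
    simp only [List.length_replicate]
    by_cases h : n ≥ 4
    · have h1 : min 5 (n + 1) = 5 := by omega
      have h2 : 5 - (n + 1) = 0 := by omega
      rw [h1, h2, List.take_zero]
      have hp : ((((5 : Nat) : Int) + onesIn ([] : List Int)) == 5) = true := by
        norm_num [onesIn]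
      rw [if_pos hp]
      push_cast
      omega
    · have h1 : min 5 (n + 1) = n + 1 := by omega
      have h2 : 5 - (n + 1) = (3 - n) + 1 := by omega
      rw [h1, h2, List.take_cons (show 0 < 3 - n + 1 by omega), onesIn_cons]
      simp only [Nat.add_sub_cancel]
      have hb1 : onesIn (xs.take (3 - n)) ≤ (xs.take (3 - n)).length := onesIn_le_length _
      have hb2 : (xs.take (3 - n)).length ≤ 3 - n := by simp [List.length_take]
      have hb0 : 0 ≤ onesIn (xs.take (3 - n)) := onesIn_nonneg _
      have hbx : (x == 1) = false := by simp [hx]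
      have hn3 : n ≤ 3 := by omega
      have hcast : (((3 - n : Nat)) : Int) = 3 - (n : Int) := by omega
      have hc : onesIn (xs.take (3 - n)) ≤ 3 - (n : Int) := by
        have hl : ((xs.take (3 - n)).length : Int) ≤ (((3 - n : Nat)) : Int) := by
          exact_mod_cast hb2
        omega
      have hne : ¬ ((((n + 1 : Nat) : Int) + ((if x == 1 then 1 else 0) + onesIn (xs.take (3 - n)))) == 5) = true := by
        rw [hbx]
        simp only [beq_iff_eq]
        push_cast
        omega
      rw [if_neg hne]
      push_cast
      omega

theorem gRec_eq (xs : List Int) (k : Nat) :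
    gRec k xs = aRec (List.replicate k 1 ++ xs) - max ((k : Int) - 4) 0 := by
  induction xs generalizing k with
  | nil => rw [List.append_nil]; simp [gRec, aRec_replicate]
  | cons x xs ih =>
    by_cases hx : x = 1
    · subst hx
      have hl : List.replicate k (1 : Int) ++ 1 :: xs = List.replicate (k + 1) 1 ++ xs := by
        rw [List.replicate_succ']
        simp
      rw [hl]
      show (if ((1 : Int) == 1) = true then (if (k : Int) + 1 ≥ 5 then 1 else 0) + gRec (k + 1) xs
            else gRec 0 xs) = _
      rw [if_pos (by simp), ih (k + 1)]
      push_cast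
      split <;> omega
    · show (if (x == 1) = true then (if (k : Int) + 1 ≥ 5 then 1 else 0) + gRec (k + 1) xs
            else gRec 0 xs) = _
      rw [if_neg (by simp [hx]), ih 0, aRec_replicate_append_ne k x xs hx]
      simp

-- ===== VERDICT (by name: the statement is the Claim_ definition above) =====
theorem count_spec : Claim_equal_count := by
  intro seq _
  show count seq = count_alt seq
  rw [count_eq_aRec]
  unfold count_alt
  have h0 : (((0 : Int), (0 : Int)) : Int × Int) = (((0 : Nat) : Int), (0 : Int)) := by norm_num
  rw [h0, foldB, gRec_eq]
  have hm : max (((0 : Nat) : Int) - 4) 0 = 0 := by norm_num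
  rw [hm]
  simp
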